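-- pv_equiv track=rewrite | github.com/Umbrasyl/VigenereCipher | main.py | key_phrase_creator
-- ===== SOURCE A (Python) =====
-- alphabet = ["A", "B", "C", "D", "E", "F", "G", "H", "I", "J", "K", "L", "M", "N",
--             "O", "P", "Q", "R", "S", "T", "U", "V", "W", "X", "Y", "Z"]
--
-- def key_phrase_creator(key, message):
--     i = 0
--     key_phrase = ""
--     for letter in message:
--         if letter.upper() in alphabet:
--             key_phrase += key[i % len(key)]
--             i += 1
--         else:
--             key_phrase += letter
--     return key_phrase
-- ===== SOURCE B (Python) =====
-- alphabet = ["A", "B", "C", "D", "E", "F", "G", "H", "I", "J", "K", "L", "M", "N",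
--             "O", "P", "Q", "R", "S", "T", "U", "V", "W", "X", "Y", "Z"]
--
-- def key_phrase_creator(key, message):
--     count = sum(1 for c in message if c.upper() in alphabet)
--     keystream = ''.join(key[j % len(key)] for j in range(count))
--     it = iter(keystream)
--     return ''.join(next(it) if c.upper() in alphabet else c for c in message)
-- ===== Notes on version B (the rewrite author's own statement) =====
-- stated objective: alternative
-- what changed: A's single fused pass with a running key counter is split into three passes: count the alphabetic characters, build the whole repeating keystream up front with join over range(count), then merge message and keystream with an iterator.
import Mathlib
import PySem

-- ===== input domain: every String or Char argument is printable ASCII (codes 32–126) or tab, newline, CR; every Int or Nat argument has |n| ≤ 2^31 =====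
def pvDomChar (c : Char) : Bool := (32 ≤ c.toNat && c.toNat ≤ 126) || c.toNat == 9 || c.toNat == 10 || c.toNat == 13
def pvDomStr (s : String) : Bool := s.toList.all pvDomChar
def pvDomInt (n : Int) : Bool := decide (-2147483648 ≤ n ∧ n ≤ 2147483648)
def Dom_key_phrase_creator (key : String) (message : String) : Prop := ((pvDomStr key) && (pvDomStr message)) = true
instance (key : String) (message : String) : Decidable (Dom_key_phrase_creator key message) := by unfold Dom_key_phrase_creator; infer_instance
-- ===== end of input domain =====

-- B replaces A's single fused pass (running key counter) by three passes: count the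
-- letters, build the whole keystream up front, then merge it back in (objective: alternative).

-- shared module constant: the 26-element uppercase alphabet (list of 1-char strings)
def pvAlphabet : List (List Char) :=
  [['A'], ['B'], ['C'], ['D'], ['E'], ['F'], ['G'], ['H'], ['I'], ['J'], ['K'], ['L'], ['M'],
   ['N'], ['O'], ['P'], ['Q'], ['R'], ['S'], ['T'], ['U'], ['V'], ['W'], ['X'], ['Y'], ['Z']]

-- 'letter.upper() in alphabet'
def pvIsLetter (c : Char) : Bool := pvAlphabet.contains (PySem.Chars.upper [c])

-- ===== PORT A =====
-- one fused pass: state = (running key index i, accumulated output);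
-- key[i % len(key)] ported as pyGetD (in range whenever Pre_ holds and the branch fires)
def key_phrase_creator (key : String) (message : String) : String :=
  let kl := key.toList
  let st := message.toList.foldl
    (fun (st : Int × List Char) letter =>
      if pvIsLetter letter then
        (st.1 + 1, st.2 ++ [PySem.List.pyGetD kl (PySem.Int.mod st.1 (kl.length : Int)) 'A'])
      else
        (st.1, st.2 ++ [letter]))
    (0, [])
  String.mk st.2

-- ===== PORT B =====
-- pass 1: count = sum(1 for c in message if c.upper() in alphabet)
-- pass 2: keystream = ''.join(key[j % len(key)] for j in range(count))
-- pass 3: merge, consuming the keystream like next(it) (headD/drop totalize next())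
def key_phrase_creator_alt (key : String) (message : String) : String :=
  let kl := key.toList
  let count := message.toList.foldl (fun (n : Int) c => if pvIsLetter c then n + 1 else n) 0
  let keystream := (PySem.List.pyRange 0 count 1).map
    (fun j => PySem.List.pyGetD kl (PySem.Int.mod j (kl.length : Int)) 'A')
  let st := message.toList.foldl
    (fun (st : List Char × List Char) c =>
      if pvIsLetter c then (st.1.drop 1, st.2 ++ [st.1.headD 'A'])
      else (st.1, st.2 ++ [c]))
    (keystream, [])
  String.mk st.2

-- ===== PRECONDITION & SPEC =====
-- Pre_ excludes exactly the inputs where Python A raises ZeroDivisionError: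
-- an empty key together with at least one alphabetic character in the message.
def Pre_key_phrase_creator (key : String) (message : String) : Prop :=
  key.toList ≠ [] ∨ message.toList.all (fun c => !pvIsLetter c) = true
instance (key : String) (message : String) : Decidable (Pre_key_phrase_creator key message) := by
  unfold Pre_key_phrase_creator; infer_instance

def pvWitness_key_phrase_creator : String × String := ("KEY", "Hi, there!")

def Spec_key_phrase_creator (key : String) (message : String) (out : String) : Prop :=
  out = key_phrase_creator_alt key message
instance (key : String) (message : String) (out : String) : Decidable (Spec_key_phrase_creator key message out) := by
  unfold Spec_key_phrase_creator; infer_instance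

-- ===== CLAIM (what is proved, stated in full; the proofs are below) =====
def Claim_equal_key_phrase_creator : Prop := ∀ (key : String) (message : String), Dom_key_phrase_creator key message → Pre_key_phrase_creator key message → Spec_key_phrase_creator key message (key_phrase_creator key message)

-- ===== LEMMAS AND PROOFS =====

-- B's counting pass computes countP
lemma pv_count_eq (l : List Char) (n : Int) :
    l.foldl (fun (n : Int) c => if pvIsLetter c then n + 1 else n) n = n + (l.countP pvIsLetter : Int) := by
  induction l generalizing n with
  | nil => simp
  | cons c l ih =>
    by_cases h : pvIsLetter c <;> simp [h, ih] <;> ring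

-- merging a keystream aligned at i equals A's fused pass with counter i
lemma pv_merge_eq (kl : List Char) (l : List Char) (i : Int) (acc : List Char) (hi : 0 ≤ i) :
    (l.foldl
      (fun (st : List Char × List Char) c =>
        if pvIsLetter c then (st.1.drop 1, st.2 ++ [st.1.headD 'A'])
        else (st.1, st.2 ++ [c]))
      ((PySem.List.pyRange i (i + (l.countP pvIsLetter : Int)) 1).map
        (fun j => PySem.List.pyGetD kl (PySem.Int.mod j (kl.length : Int)) 'A'), acc)).2
    = (l.foldl
      (fun (st : Int × List Char) letter =>
        if pvIsLetter letter then
          (st.1 + 1, st.2 ++ [PySem.List.pyGetD kl (PySem.Int.mod st.1 (kl.length : Int)) 'A'])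
        else (st.1, st.2 ++ [letter]))
      (i, acc)).2 := by
  induction l generalizing i acc with
  | nil => simp
  | cons c l ih =>
    by_cases h : pvIsLetter c
    · have hlt : i < i + ((List.countP pvIsLetter (c :: l) : Nat) : Int) := by
        have : 0 < List.countP pvIsLetter (c :: l) := by simp [h]
        omega
      rw [PySem.List.pyRange_one_cons hlt]
      simp only [List.map_cons, List.foldl_cons, h, if_true, List.headD_cons,
        List.drop_succ_cons, List.drop_zero]
      have hcnt : i + ((List.countP pvIsLetter (c :: l) : Nat) : Int)
          = (i + 1) + ((List.countP pvIsLetter l : Nat) : Int) := by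
        simp [h]
        ring
      rw [hcnt]
      exact ih (i + 1) (acc ++ [PySem.List.pyGetD kl (PySem.Int.mod i (kl.length : Int)) 'A'])
        (by omega)
    · have hcnt : ((List.countP pvIsLetter (c :: l) : Nat) : Int)
          = ((List.countP pvIsLetter l : Nat) : Int) := by
        simp [h]
      rw [hcnt]
      simp only [List.foldl_cons, if_neg h]
      exact ih i (acc ++ [c]) hi

-- ===== VERDICT (by name: the statement is the Claim_ definition above) =====
theorem key_phrase_creator_spec : Claim_equal_key_phrase_creator := by
  intro key message _ _
  unfold Spec_key_phrase_creator key_phrase_creator key_phrase_creator_alt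
  simp only []
  rw [pv_count_eq message.toList 0]
  have h := pv_merge_eq key.toList message.toList 0 [] le_rfl
  rw [show ((0 : Int) + (message.toList.countP pvIsLetter : Int))
      = (message.toList.countP pvIsLetter : Int) by ring] at h ⊢
  rw [h]
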